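-- pv_equiv track=rewrite | github.com/mihoubmessaoud-dotcom/SEC_SYSTEM3_ENHANCED | backups/full_app_backup_20260318_052826/tools/institutional_campaign_runner.py | parse_batch_paths
-- ===== SOURCE A (Python) =====
-- def parse_batch_paths(stdout):
--     json_path = None
--     md_path = None
--     for line in (stdout or '').splitlines():
--         s = line.strip()
--         if s.startswith('outputs\\') and s.endswith('.json'):
--             json_path = s
--         if s.startswith('outputs\\') and s.endswith('.md'):
--             md_path = s
--     return json_path, md_path
-- ===== SOURCE B (Python) =====
-- def parse_batch_paths(stdout):
--     lines = [line.strip() for line in (stdout or '').splitlines()]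
--     def last_with_ext(ext):
--         return next((s for s in reversed(lines)
--                      if s.startswith('outputs\\') and s.endswith(ext)), None)
--     return last_with_ext('.json'), last_with_ext('.md')
-- ===== Notes on version B (the rewrite author's own statement) =====
-- stated objective: alternative
-- what changed: Replaces the single forward accumulating loop (which overwrites json_path/md_path) with one strip pass and two independent reverse first-match searches, one per extension.
import Mathlib
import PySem

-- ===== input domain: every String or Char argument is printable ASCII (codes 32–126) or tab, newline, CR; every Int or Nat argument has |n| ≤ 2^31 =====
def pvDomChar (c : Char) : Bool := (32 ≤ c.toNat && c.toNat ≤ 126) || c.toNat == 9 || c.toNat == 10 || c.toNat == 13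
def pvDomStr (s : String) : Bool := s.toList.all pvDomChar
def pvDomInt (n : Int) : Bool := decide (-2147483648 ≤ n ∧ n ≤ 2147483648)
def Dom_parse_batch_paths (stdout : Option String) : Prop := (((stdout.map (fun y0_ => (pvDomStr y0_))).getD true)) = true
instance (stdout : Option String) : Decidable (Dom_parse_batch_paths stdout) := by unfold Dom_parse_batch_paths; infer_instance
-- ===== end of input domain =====

-- B replaces A's single forward accumulating loop by one strip pass plus two
-- independent reverse first-match searches (alternative decomposition, same cost).

-- ===== PORT A =====
-- one step of A's for-loop over the state (json_path, md_path)
def pvStepA (st : Option String × Option String) (line : String) :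
    Option String × Option String :=
  let s := PySem.Str.strip line
  let st1 := if PySem.Str.startswith s "outputs\\" && PySem.Str.endswith s ".json"
             then (some s, st.2) else st
  if PySem.Str.startswith s "outputs\\" && PySem.Str.endswith s ".md"
  then (st1.1, some s) else st1

def parse_batch_paths (stdout : Option String) : Option String × Option String :=
  (PySem.Str.splitlines (stdout.getD "")).foldl pvStepA (none, none)

-- ===== PORT B =====
-- first match, scanning the stripped lines from the end
def pvLastWithExt (lines : List String) (ext : String) : Option String :=
  lines.reverse.find?
    (fun s => PySem.Str.startswith s "outputs\\" && PySem.Str.endswith s ext)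

def parse_batch_paths_alt (stdout : Option String) : Option String × Option String :=
  let lines := (PySem.Str.splitlines (stdout.getD "")).map PySem.Str.strip
  (pvLastWithExt lines ".json", pvLastWithExt lines ".md")

-- ===== PRECONDITION & SPEC =====
def Spec_parse_batch_paths (stdout : Option String) (out : Option String × Option String) : Prop := out = parse_batch_paths_alt stdout
instance (stdout : Option String) (out : Option String × Option String) : Decidable (Spec_parse_batch_paths stdout out) := by unfold Spec_parse_batch_paths; infer_instance

-- ===== CLAIM (what is proved, stated in full; the proofs are below) =====
def Claim_equal_parse_batch_paths : Prop := ∀ (stdout : Option String), Dom_parse_batch_paths stdout → Spec_parse_batch_paths stdout (parse_batch_paths stdout)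

-- ===== LEMMAS AND PROOFS =====

-- A's loop step with the two predicates abstracted (proof helper only)
def pvStepG (p q : String → Bool) (st : Option String × Option String) (line : String) :
    Option String × Option String :=
  let s := PySem.Str.strip line
  let st1 := if p s then (some s, st.2) else st
  if q s then (st1.1, some s) else st1

theorem pvStepA_eq_G : pvStepA = pvStepG
    (fun s => PySem.Str.startswith s "outputs\\" && PySem.Str.endswith s ".json")
    (fun s => PySem.Str.startswith s "outputs\\" && PySem.Str.endswith s ".md") := rfl

-- the accumulating fold equals two independent reverse first-match searches
theorem pvFoldG_eq (p q : String → Bool) (ls : List String)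
    (st : Option String × Option String) :
    List.foldl (pvStepG p q) st ls =
      (((ls.map PySem.Str.strip).reverse.find? p).or st.1,
       ((ls.map PySem.Str.strip).reverse.find? q).or st.2) := by
  induction ls generalizing st with
  | nil => simp
  | cons l ls ih =>
      rw [List.foldl_cons, ih]
      by_cases hp : p (PySem.Str.strip l) = true <;>
      by_cases hq : q (PySem.Str.strip l) = true <;>
        simp [pvStepG, hp, hq, List.find?_append, List.find?]

-- ===== VERDICT (by name: the statement is the Claim_ definition above) =====
theorem parse_batch_paths_spec : Claim_equal_parse_batch_paths := by
  intro stdout _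
  show parse_batch_paths stdout = parse_batch_paths_alt stdout
  unfold parse_batch_paths parse_batch_paths_alt pvLastWithExt
  rw [pvStepA_eq_G, pvFoldG_eq, Option.or_none, Option.or_none]
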